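-- pv_equiv track=rewrite | github.com/Ruadaa/cadence_to_visio | cadence_to_visio_V2.py | match_device_type
-- ===== SOURCE A (Python) =====
-- DEVICE_LIBRARY = {
--     "NMOS": {
--         "inst_prefix": ["NM", "M"],
--         "netlist_prefix": ["XNM","XM"],
--         "master_name": "NMOS",
--         # "master_name": "NMOS_B",
--         "size": (0.44, 0.59),
--         "pins": {
--             "D": ( 0.5,  0.5),
--             "G": (-0.5, 0.0017),
--             "S": ( 0.5, -0.5),
--             "B": ( 0.4759,  0.0),
--         }
--     },
--     "PMOS": {
--         "inst_prefix": ["PM"],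
--         "netlist_prefix": ["XPM"],
--         "master_name": "PMOS",
--         # "master_name": "PMOS_B",
--         "size": (0.44, 0.59),
--         "pins": {
--             "D": ( 0.5, -0.5),
--             "G": (-0.5, 0.0017),
--             "S": ( 0.5,  0.5),
--             "B": ( 0.4759,  0.0),
--         }
--     },
--     "RES": {
--         "inst_prefix": ["R"],
--         "netlist_prefix": ["XR"],
--         "master_name": "R",
--         "size": (0.20, 0.59),
--         "pins": {
--             "R_up":   (0.0,  0.5),
--             "R_down": (0.0, -0.5),
--         }
--     },
--     "Cap": {
--         "inst_prefix": ["C"],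
--         "netlist_prefix": ["CC"],
--         "master_name": "C",
--         "size": (0.20, 0.59),
--         "pins": {
--             "C_up":   (0.0,  0.5),
--             "C_down": (0.0, -0.5),
--         }
--     },
--     # === 新增 Unknown 器件 ===
--     "UNKNOWN": {
--         "inst_prefix": [],
--         "netlist_prefix": [],
--         "master_name": "Unknown",
--         "size": (0.43, 0.43),
--         "pins": {
--             "P1": (0.0, 0.5),
--             "P2": (0.0, -0.5),
--             "P3": (0.5, 0),
--             "P4": (-0.5, 0),
--             "P5": (0.0, 0)
--         }
--     }
--     # 以后你可以自己加新器件
-- }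
--
-- def match_device_type(name, from_netlist=False):
--     candidates = []
--     for dev_type, cfg in DEVICE_LIBRARY.items():
--         prefixes = cfg["netlist_prefix"] if from_netlist else cfg["inst_prefix"]
--         for p in prefixes:
--             candidates.append((len(p), p, dev_type))
--     # 按前缀长度从大到小排序
--     for _, p, dev_type in sorted(candidates, key=lambda x: -x[0]):
--         if name.upper().startswith(p.upper()):
--             return dev_type
--     return "UNKNOWN"
-- ===== SOURCE B (Python) =====
-- DEVICE_LIBRARY = {
--     "NMOS": {"inst_prefix": ["NM", "M"], "netlist_prefix": ["XNM", "XM"]},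
--     "PMOS": {"inst_prefix": ["PM"], "netlist_prefix": ["XPM"]},
--     "RES": {"inst_prefix": ["R"], "netlist_prefix": ["XR"]},
--     "Cap": {"inst_prefix": ["C"], "netlist_prefix": ["CC"]},
--     "UNKNOWN": {"inst_prefix": [], "netlist_prefix": []},
-- }
--
-- def match_device_type(name, from_netlist=False):
--     upper = name.upper()
--     best_len = -1
--     best_type = "UNKNOWN"
--     for dev_type, cfg in DEVICE_LIBRARY.items():
--         prefixes = cfg["netlist_prefix"] if from_netlist else cfg["inst_prefix"]
--         for p in prefixes:
--             if len(p) > best_len and upper.startswith(p.upper()):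
--                 best_len = len(p)
--                 best_type = dev_type
--     return best_type
-- ===== Notes on version B (the rewrite author's own statement) =====
-- stated objective: simpler
-- what changed: B replaces A's build-a-candidate-list-then-sort-by-length-then-scan with a single pass over DEVICE_LIBRARY in insertion order keeping the longest matching prefix so far (strict > reproduces the stable sort's tie-break).
import Mathlib
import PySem

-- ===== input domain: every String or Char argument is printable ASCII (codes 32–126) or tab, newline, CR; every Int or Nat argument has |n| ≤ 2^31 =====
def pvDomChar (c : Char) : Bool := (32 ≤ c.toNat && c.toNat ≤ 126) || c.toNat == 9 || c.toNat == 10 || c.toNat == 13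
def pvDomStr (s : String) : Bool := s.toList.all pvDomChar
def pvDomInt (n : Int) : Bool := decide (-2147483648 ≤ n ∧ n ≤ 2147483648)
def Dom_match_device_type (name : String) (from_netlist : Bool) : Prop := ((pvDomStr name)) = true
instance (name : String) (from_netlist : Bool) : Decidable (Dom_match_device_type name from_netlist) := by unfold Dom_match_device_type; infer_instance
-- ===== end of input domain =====

-- B replaces A's build-candidates/sort/scan with a single argmax pass over the library (objective: simpler).

-- ===== PORT A =====
-- DEVICE_LIBRARY, restricted to the fields match_device_type reads: (dev_type, inst_prefix, netlist_prefix), insertion order.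
def pvDeviceLibrary : List (String × List String × List String) :=
  [("NMOS", ["NM", "M"], ["XNM", "XM"]),
   ("PMOS", ["PM"], ["XPM"]),
   ("RES", ["R"], ["XR"]),
   ("Cap", ["C"], ["CC"]),
   ("UNKNOWN", [], [])]

-- A's second for-loop: first candidate of the sorted list whose prefix matches, else "UNKNOWN"
def pvFirstLoop (name : String) : List (Int × String × String) → String
  | [] => "UNKNOWN"
  | (_, p, dev) :: rest =>
    if PySem.Str.startswith (PySem.Str.upper name) (PySem.Str.upper p) then dev
    else pvFirstLoop name rest

def match_device_type (name : String) (from_netlist : Bool) : String :=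
  let candidates := pvDeviceLibrary.foldl (fun acc e =>
    (if from_netlist then e.2.2 else e.2.1).foldl
      (fun acc2 p => acc2 ++ [(PySem.Str.len p, p, e.1)]) acc) []
  pvFirstLoop name (PySem.List.sorted candidates (fun x => -x.1) false)

-- ===== PORT B =====
def match_device_type_alt (name : String) (from_netlist : Bool) : String :=
  let upper := PySem.Str.upper name
  let best := pvDeviceLibrary.foldl (fun (st : Int × String) e =>
    (if from_netlist then e.2.2 else e.2.1).foldl
      (fun (st2 : Int × String) p =>
        if PySem.Str.len p > st2.1 && PySem.Str.startswith upper (PySem.Str.upper p) then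
          (PySem.Str.len p, e.1)
        else st2) st) (-1, "UNKNOWN")
  best.2

-- ===== PRECONDITION & SPEC =====
def Spec_match_device_type (name : String) (from_netlist : Bool) (out : String) : Prop := out = match_device_type_alt name from_netlist
instance (name : String) (from_netlist : Bool) (out : String) : Decidable (Spec_match_device_type name from_netlist out) := by unfold Spec_match_device_type; infer_instance

-- ===== CLAIM (what is proved, stated in full; the proofs are below) =====
def Claim_equal_match_device_type : Prop := ∀ (name : String) (from_netlist : Bool), Dom_match_device_type name from_netlist → Spec_match_device_type name from_netlist (match_device_type name from_netlist)

-- ===== LEMMAS AND PROOFS =====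

-- inst_prefix case: split on which of the five fixed prefixes match name.upper(), then both sides compute.
theorem pv_eq_false (name : String) : match_device_type name false = match_device_type_alt name false := by
  by_cases h1 : PySem.Chars.startswith (PySem.Chars.upper name.toList) ['N','M'] <;>
  by_cases h2 : PySem.Chars.startswith (PySem.Chars.upper name.toList) ['M'] <;>
  by_cases h3 : PySem.Chars.startswith (PySem.Chars.upper name.toList) ['P','M'] <;>
  by_cases h4 : PySem.Chars.startswith (PySem.Chars.upper name.toList) ['R'] <;>
  by_cases h5 : PySem.Chars.startswith (PySem.Chars.upper name.toList) ['C'] <;>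
  simp [match_device_type, match_device_type_alt, pvDeviceLibrary, pvFirstLoop,
    PySem.List.sorted, PySem.List.insertBy,
    show "NM".length = 2 from by decide, show "M".length = 1 from by decide,
    show "PM".length = 2 from by decide, show "R".length = 1 from by decide,
    show "C".length = 1 from by decide,
    show PySem.Chars.upper ['N','M'] = ['N','M'] from by decide,
    show PySem.Chars.upper ['M'] = ['M'] from by decide,
    show PySem.Chars.upper ['P','M'] = ['P','M'] from by decide,
    show PySem.Chars.upper ['R'] = ['R'] from by decide,
    show PySem.Chars.upper ['C'] = ['C'] from by decide,
    h1, h2, h3, h4, h5]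

-- netlist_prefix case: same split over the five netlist prefixes.
theorem pv_eq_true (name : String) : match_device_type name true = match_device_type_alt name true := by
  by_cases h1 : PySem.Chars.startswith (PySem.Chars.upper name.toList) ['X','N','M'] <;>
  by_cases h2 : PySem.Chars.startswith (PySem.Chars.upper name.toList) ['X','M'] <;>
  by_cases h3 : PySem.Chars.startswith (PySem.Chars.upper name.toList) ['X','P','M'] <;>
  by_cases h4 : PySem.Chars.startswith (PySem.Chars.upper name.toList) ['X','R'] <;>
  by_cases h5 : PySem.Chars.startswith (PySem.Chars.upper name.toList) ['C','C'] <;>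
  simp [match_device_type, match_device_type_alt, pvDeviceLibrary, pvFirstLoop,
    PySem.List.sorted, PySem.List.insertBy,
    show "XNM".length = 3 from by decide, show "XM".length = 2 from by decide,
    show "XPM".length = 3 from by decide, show "XR".length = 2 from by decide,
    show "CC".length = 2 from by decide,
    show PySem.Chars.upper ['X','N','M'] = ['X','N','M'] from by decide,
    show PySem.Chars.upper ['X','M'] = ['X','M'] from by decide,
    show PySem.Chars.upper ['X','P','M'] = ['X','P','M'] from by decide,
    show PySem.Chars.upper ['X','R'] = ['X','R'] from by decide,
    show PySem.Chars.upper ['C','C'] = ['C','C'] from by decide,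
    h1, h2, h3, h4, h5]

-- ===== VERDICT (by name: the statement is the Claim_ definition above) =====
theorem match_device_type_spec : Claim_equal_match_device_type := by
  intro name fn _
  unfold Spec_match_device_type
  cases fn
  · exact pv_eq_false name
  · exact pv_eq_true name
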